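-- pv_equiv track=rewrite | github.com/badillosoft/python-pcap | sesion4/tiendicraft.py | stock_remove_product_by_id
-- ===== SOURCE A (Python) =====
-- def stock_add_product(stock, product, n = 1):
--     for i in range(n):
--         stock.append(product)
--
-- def stock_count_product_by_id(stock, product_id):
--     count = 0
--     for stock_product in stock:
--         if stock_product["id"] == product_id:
--             count += 1
--     return count
--
-- def stock_get_product_by_id(stock, product_id):
--     for stock_product in stock:
--         if stock_product["id"] == product_id:
--             return stock_product
--     return None
--
-- def stock_remove_product_by_id(stock, product_id, n = 1):
--     product = stock_get_product_by_id(stock, product_id)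
--
--     # El número de productos en el stock
--     N = stock_count_product_by_id(stock, product_id)
--
--     # La diferencia de los productos que querían en el nuevo stock
--     D = N - n
--
--     # Nuevo stock sin los productos que se quieren quitar
--     new_stock = [stock_product for stock_product in stock if stock_product["id"] != product_id]
--
--     # Agregar los productos al nuevo stock de diferencia
--     if D > 0:
--         stock_add_product(new_stock, product, D)
--
--     return new_stock
-- ===== SOURCE B (Python) =====
-- def stock_remove_product_by_id(stock, product_id, n = 1):
--     matched = []
--     kept = []
--     for p in stock:
--         (matched if p["id"] == product_id else kept).append(p)
--     D = len(matched) - n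
--     if D <= 0:
--         return kept
--     return kept + [matched[0]] * D
-- ===== Notes on version B (the rewrite author's own statement) =====
-- stated objective: simpler
-- what changed: A makes three separate scans of stock (first match, count, filtering comprehension) plus an append loop; B partitions stock into matched/kept in one pass and appends the first match via list replication.
-- outside the precondition, e.g. on stock_remove_product_by_id([{'id': 1}], 2, -1): A returns [{'id': 1}, None], B raises IndexError
import Mathlib
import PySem

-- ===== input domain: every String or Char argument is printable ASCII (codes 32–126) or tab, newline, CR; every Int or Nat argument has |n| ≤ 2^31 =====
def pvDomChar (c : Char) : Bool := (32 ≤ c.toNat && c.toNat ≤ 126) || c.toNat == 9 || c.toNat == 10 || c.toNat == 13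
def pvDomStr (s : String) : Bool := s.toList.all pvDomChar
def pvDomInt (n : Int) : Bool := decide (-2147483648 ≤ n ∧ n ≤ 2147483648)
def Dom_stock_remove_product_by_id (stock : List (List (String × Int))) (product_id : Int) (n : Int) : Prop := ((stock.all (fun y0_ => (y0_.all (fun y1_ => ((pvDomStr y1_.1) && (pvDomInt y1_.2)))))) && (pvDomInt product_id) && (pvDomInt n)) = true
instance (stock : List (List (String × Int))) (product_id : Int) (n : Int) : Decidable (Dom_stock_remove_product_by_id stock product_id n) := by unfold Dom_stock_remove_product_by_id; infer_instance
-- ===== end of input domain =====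

-- B replaces A's three separate scans of stock plus an append loop by a single partitioning
-- pass and a list replication; same cost, simpler shape. Neither implementation mutates stock.

-- d["id"]: first-match association-list lookup; the 0 default is never reached under
-- Pre_ (which requires every item to carry the "id" key, else Python raises KeyError).
def pvGetId (d : List (String × Int)) : Int := ((d.lookup "id").getD 0)

-- ===== PORT A =====
def stock_get_product_by_id (stock : List (List (String × Int))) (product_id : Int) : Option (List (String × Int)) :=
  match stock with
  | [] => none
  | p :: rest => if pvGetId p == product_id then some p else stock_get_product_by_id rest product_id

def stock_count_product_by_id (stock : List (List (String × Int))) (product_id : Int) : Int :=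
  stock.foldl (fun count p => if pvGetId p == product_id then count + 1 else count) 0

-- stock.append(product) repeated for i in range(D); A only calls it with product = some _ under Pre_
def stock_add_product (stock : List (List (String × Int))) (product : List (String × Int)) (n : Int) : List (List (String × Int)) :=
  (PySem.List.pyRange 0 n 1).foldl (fun acc _ => acc ++ [product]) stock

def stock_remove_product_by_id (stock : List (List (String × Int))) (product_id : Int) (n : Int) : List (List (String × Int)) :=
  let product := stock_get_product_by_id stock product_id
  let N := stock_count_product_by_id stock product_id
  let D := N - n
  let new_stock := stock.filter (fun p => pvGetId p != product_id)
  if D > 0 then stock_add_product new_stock (product.getD []) D else new_stock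

-- ===== PORT B =====
def stock_remove_product_by_id_alt (stock : List (List (String × Int))) (product_id : Int) (n : Int) : List (List (String × Int)) :=
  let mk := stock.foldl
    (fun (acc : List (List (String × Int)) × List (List (String × Int))) p =>
      if pvGetId p == product_id then (acc.1 ++ [p], acc.2) else (acc.1, acc.2 ++ [p]))
    ([], [])
  let D : Int := (mk.1.length : Int) - n
  if D ≤ 0 then mk.2 else mk.2 ++ List.replicate D.toNat (mk.1.headD [])

-- ===== PRECONDITION & SPEC =====
-- Pre_ excludes (i) items missing the "id" key, where Python A raises KeyError, and
-- (ii) negative n with no matching item, where A returns a list containing None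
-- (not a list of dicts) and B raises IndexError.
def Pre_stock_remove_product_by_id (stock : List (List (String × Int))) (product_id : Int) (n : Int) : Prop :=
  (∀ d ∈ stock, (d.lookup "id").isSome) ∧ (0 ≤ n ∨ ∃ d ∈ stock, pvGetId d = product_id)
instance (stock : List (List (String × Int))) (product_id : Int) (n : Int) : Decidable (Pre_stock_remove_product_by_id stock product_id n) := by unfold Pre_stock_remove_product_by_id; infer_instance

def pvWitness_stock_remove_product_by_id : (List (List (String × Int))) × Int × Int :=
  ([[("id", 1), ("qty", 5)], [("id", 2)], [("id", 1)]], 1, 1)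

def Spec_stock_remove_product_by_id (stock : List (List (String × Int))) (product_id : Int) (n : Int) (out : List (List (String × Int))) : Prop := out = stock_remove_product_by_id_alt stock product_id n
instance (stock : List (List (String × Int))) (product_id : Int) (n : Int) (out : List (List (String × Int))) : Decidable (Spec_stock_remove_product_by_id stock product_id n out) := by unfold Spec_stock_remove_product_by_id; infer_instance

-- ===== CLAIM (what is proved, stated in full; the proofs are below) =====
def Claim_equal_stock_remove_product_by_id : Prop := ∀ (stock : List (List (String × Int))) (product_id : Int) (n : Int), Dom_stock_remove_product_by_id stock product_id n → Pre_stock_remove_product_by_id stock product_id n → Spec_stock_remove_product_by_id stock product_id n (stock_remove_product_by_id stock product_id n)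

-- ===== LEMMAS AND PROOFS =====

-- B's partitioning fold computes the two filters of stock.
theorem partition_fold_eq (pid : Int) (l : List (List (String × Int)))
    (m k : List (List (String × Int))) :
    l.foldl (fun (acc : List (List (String × Int)) × List (List (String × Int))) p =>
        if pvGetId p == pid then (acc.1 ++ [p], acc.2) else (acc.1, acc.2 ++ [p])) (m, k)
      = (m ++ l.filter (fun p => pvGetId p == pid), k ++ l.filter (fun p => pvGetId p != pid)) := by
  induction l generalizing m k with
  | nil => simp
  | cons p rest ih =>
    rw [List.foldl_cons, List.filter_cons, List.filter_cons]
    by_cases h : (pvGetId p == pid) = true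
    · rw [if_pos h, if_pos h, ih]
      simp [bne, h]
    · rw [if_neg h, if_neg h, ih]
      simp only [Bool.not_eq_true] at h
      simp [bne, h]

-- A's counting loop counts the matching filter's length.
theorem count_eq_filter_length (pid : Int) (l : List (List (String × Int))) (c : Int) :
    l.foldl (fun count p => if pvGetId p == pid then count + 1 else count) c
      = c + ((l.filter (fun p => pvGetId p == pid)).length : Int) := by
  induction l generalizing c with
  | nil => simp
  | cons p rest ih =>
    rw [List.foldl_cons, List.filter_cons]
    by_cases h : (pvGetId p == pid) = true
    · rw [if_pos h, if_pos h, ih]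
      simp only [List.length_cons]
      push_cast
      ring
    · rw [if_neg h, if_neg h, ih]

-- A's first-match search is the head of the matching filter.
theorem get_eq_filter_head (pid : Int) (l : List (List (String × Int))) :
    stock_get_product_by_id l pid = (l.filter (fun p => pvGetId p == pid)).head? := by
  induction l with
  | nil => rfl
  | cons p rest ih =>
    by_cases h : pvGetId p == pid <;> simp [stock_get_product_by_id, h, ih]

-- A's append loop over range(0, D) is a replication appended at the end.
theorem foldl_append_replicate (x : List (String × Int)) (l : List Int)
    (s : List (List (String × Int))) :
    l.foldl (fun acc _ => acc ++ [x]) s = s ++ List.replicate l.length x := by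
  induction l generalizing s with
  | nil => simp
  | cons a rest ih =>
    rw [List.foldl_cons, ih]
    simp [List.replicate_succ]

-- ===== VERDICT (by name: the statement is the Claim_ definition above) =====
theorem stock_remove_product_by_id_spec : Claim_equal_stock_remove_product_by_id := by
  intro stock pid n _ _
  unfold Spec_stock_remove_product_by_id
  unfold stock_remove_product_by_id stock_remove_product_by_id_alt
      stock_count_product_by_id stock_add_product
  simp only [partition_fold_eq, count_eq_filter_length, get_eq_filter_head,
      foldl_append_replicate, PySem.List.length_pyRange_one,
      List.nil_append, zero_add, Int.sub_zero]
  set M := stock.filter (fun p => pvGetId p == pid) with hM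
  set K := stock.filter (fun p => pvGetId p != pid) with hK
  by_cases h : ((M.length : Int) - n > 0)
  · rw [if_pos h, if_neg (by omega)]
    congr 1
    cases M <;> simp
  · rw [if_neg h, if_pos (by omega)]
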